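-- pv_equiv track=rewrite | github.com/moonshine-ai/moonshine-g2p2 | scripts/ctb9_electra_onnx_pure.py | _bmes_to_spans
-- ===== SOURCE A (Python) =====
-- def _bmes_to_spans(tags: list[str]) -> list[tuple[int, int]]:
--     """``hanlp.utils.span_util.bmes_to_spans``."""
--     result: list[tuple[int, int]] = []
--     offset = 0
--     pre_offset = 0
--     for t in tags[1:]:
--         offset += 1
--         if t in ("B", "S"):
--             result.append((pre_offset, offset))
--             pre_offset = offset
--     if offset != len(tags):
--         result.append((pre_offset, len(tags)))
--     return result
-- ===== SOURCE B (Python) =====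
-- def _bmes_to_spans(tags: list[str]) -> list[tuple[int, int]]:
--     """Boundary-index-table decomposition: collect span *boundaries*, then pair them."""
--     if not tags:
--         return []
--     bounds = [i for i, t in enumerate(tags) if i == 0 or t in ("B", "S")] + [len(tags)]
--     return list(zip(bounds, bounds[1:]))
-- ===== Notes on version B (the rewrite author's own statement) =====
-- stated objective: simpler
-- what changed: Replaces the running-offset/pre-offset accumulator loop with a boundary-index table (indices where a span starts, plus len) that is paired into spans by zip.
import Mathlib
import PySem

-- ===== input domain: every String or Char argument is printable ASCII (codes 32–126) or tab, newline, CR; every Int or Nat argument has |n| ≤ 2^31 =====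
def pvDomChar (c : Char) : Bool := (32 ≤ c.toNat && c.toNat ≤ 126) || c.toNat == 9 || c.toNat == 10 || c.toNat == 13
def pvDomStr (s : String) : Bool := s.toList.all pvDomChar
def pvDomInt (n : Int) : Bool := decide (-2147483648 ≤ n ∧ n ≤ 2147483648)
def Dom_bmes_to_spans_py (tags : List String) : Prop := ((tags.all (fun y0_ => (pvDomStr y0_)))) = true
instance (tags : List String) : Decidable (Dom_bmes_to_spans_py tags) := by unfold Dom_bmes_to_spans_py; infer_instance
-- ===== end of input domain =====

-- B replaces A's running-offset accumulator loop by a boundary-index table that is then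
-- paired with zip (objective: simpler decomposition; same O(n) cost).

-- ===== PORT A =====
-- loop body: offset += 1; if t in ("B","S"): result.append((pre_offset, offset)); pre_offset = offset
def bmesStepA (s : List (Int × Int) × Int × Int) (t : String) : List (Int × Int) × Int × Int :=
  let offset := s.2.1 + 1
  if t = "B" ∨ t = "S" then (s.1 ++ [(s.2.2, offset)], offset, offset)
  else (s.1, offset, s.2.2)

def bmes_to_spans_py (tags : List String) : List (Int × Int) :=
  -- for t in tags[1:]: …   (state = (result, offset, pre_offset), starting at ([], 0, 0))
  let st := (PySem.List.slice tags (some 1) none).foldl bmesStepA ([], 0, 0)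
  -- if offset != len(tags): result.append((pre_offset, len(tags)))
  if st.2.1 ≠ (tags.length : Int) then st.1 ++ [(st.2.2, (tags.length : Int))] else st.1

-- ===== PORT B =====
def bmes_to_spans_py_alt (tags : List String) : List (Int × Int) :=
  if tags = [] then []
  else
    -- bounds = [i for i, t in enumerate(tags) if i == 0 or t in ("B","S")] + [len(tags)]
    let bounds : List Int :=
      ((PySem.List.enumerate tags).filter
        (fun p => p.1 == 0 || p.2 == "B" || p.2 == "S")).map (·.1) ++ [(tags.length : Int)]
    -- list(zip(bounds, bounds[1:]))
    List.zip bounds (PySem.List.slice bounds (some 1) none)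

-- ===== PRECONDITION & SPEC =====
def Spec_bmes_to_spans_py (tags : List String) (out : List (Int × Int)) : Prop := out = bmes_to_spans_py_alt tags
instance (tags : List String) (out : List (Int × Int)) : Decidable (Spec_bmes_to_spans_py tags out) := by unfold Spec_bmes_to_spans_py; infer_instance

-- ===== CLAIM (what is proved, stated in full; the proofs are below) =====
def Claim_equal_bmes_to_spans_py : Prop := ∀ (tags : List String), Dom_bmes_to_spans_py tags → Spec_bmes_to_spans_py tags (bmes_to_spans_py tags)

-- ===== LEMMAS AND PROOFS =====

-- boundary indices contributed by the tags after position 0, when the first of `l` sits at offset `off`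
def bIdx (l : List String) (off : Int) : List Int :=
  match l with
  | [] => []
  | t :: ts => if t = "B" ∨ t = "S" then (off + 1) :: bIdx ts (off + 1) else bIdx ts (off + 1)

-- pair a leading boundary with consecutive boundaries
def chain (pre : Int) (bs : List Int) : List (Int × Int) :=
  match bs with
  | [] => []
  | b :: bs => (pre, b) :: chain b bs

def lastB (pre : Int) (bs : List Int) : Int :=
  match bs with
  | [] => pre
  | b :: bs => lastB b bs

theorem loopA (l : List String) : ∀ (res : List (Int × Int)) (off pre : Int),
    l.foldl bmesStepA (res, off, pre)
      = (res ++ chain pre (bIdx l off), off + l.length, lastB pre (bIdx l off)) := by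
  induction l with
  | nil => intro res off pre; simp [bIdx, chain, lastB]
  | cons t ts ih =>
    intro res off pre
    have hlen : off + 1 + (ts.length : Int) = off + ((t :: ts).length : Int) := by
      simp only [List.length_cons]; push_cast; omega
    by_cases h : t = "B" ∨ t = "S"
    · simp only [List.foldl_cons, bmesStepA, if_pos h, ih, bIdx, chain, lastB, hlen,
        List.append_assoc, List.singleton_append]
    · simp only [List.foldl_cons, bmesStepA, if_neg h, ih, bIdx, hlen]

theorem zip_chain (bs : List Int) : ∀ (pre e : Int),
    List.zip (pre :: (bs ++ [e])) (bs ++ [e]) = chain pre bs ++ [(lastB pre bs, e)] := by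
  induction bs with
  | nil => intro pre e; simp [chain, lastB]
  | cons b bs ih =>
    intro pre e
    simp only [List.cons_append, List.zip_cons_cons, chain, lastB, List.cons.injEq]
    exact ⟨trivial, ih b e⟩

-- B's filtered enumeration over the tail equals bIdx
theorem filt_bIdx (ts : List String) : ∀ (k : Int), 0 < k →
    ((PySem.List.enumerate ts k).filter
        (fun p => p.1 == 0 || p.2 == "B" || p.2 == "S")).map (·.1) = bIdx ts (k - 1) := by
  induction ts with
  | nil => intro k _; simp [PySem.List.enumerate_nil, bIdx]
  | cons t ts ih =>
    intro k hk
    rw [PySem.List.enumerate_cons]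
    have e1 : k + 1 - 1 = k - 1 + 1 := by ring
    by_cases h : t = "B" ∨ t = "S"
    · have hb : ((k, t).1 == 0 || (k, t).2 == "B" || (k, t).2 == "S") = true := by
        rcases h with h | h <;> simp [h]
      rw [List.filter_cons, if_pos hb, List.map_cons, ih (k + 1) (by omega), e1]
      simp only [bIdx, if_pos h, List.cons.injEq]
      exact ⟨by simp, trivial⟩
    · have hk0 : (k == 0) = false := by simp; omega
      have hb : ¬ (((k, t).1 == 0 || (k, t).2 == "B" || (k, t).2 == "S") = true) := by
        rw [not_or] at h
        simp [hk0, h.1, h.2]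
      rw [List.filter_cons, if_neg hb, ih (k + 1) (by omega), e1]
      simp only [bIdx, if_neg h]

theorem bmes_eq (tags : List String) : bmes_to_spans_py tags = bmes_to_spans_py_alt tags := by
  cases tags with
  | nil => rfl
  | cons t ts =>
    unfold bmes_to_spans_py bmes_to_spans_py_alt
    simp only [PySem.List.slice_from_one, List.tail_cons, loopA, List.nil_append]
    rw [if_pos (by simp only [List.length_cons]; push_cast; omega :
          (0 : Int) + ts.length ≠ ((t :: ts).length : Int))]
    rw [if_neg (by simp : ¬ (t :: ts = []))]
    rw [PySem.List.enumerate_cons, List.filter_cons,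
      if_pos (show (((0 : Int), t).1 == 0 || ((0 : Int), t).2 == "B" || ((0 : Int), t).2 == "S") = true by simp),
      List.map_cons, show (0 : Int) + 1 = 1 by norm_num, filt_bIdx ts 1 (by omega),
      show (1 : Int) - 1 = 0 by norm_num]
    simp only [List.cons_append, List.tail_cons]
    rw [zip_chain]

-- ===== VERDICT (by name: the statement is the Claim_ definition above) =====
theorem bmes_to_spans_py_spec : Claim_equal_bmes_to_spans_py := by
  intro tags _
  unfold Spec_bmes_to_spans_py
  exact bmes_eq tags
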